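-- pv_equiv track=rewrite | github.com/netor27/codefights-arcade-solutions | arcade/python/arcade-theCore/13_WaterfallOfIntegration/111_Gravitation.py | stillHaveMotion
-- ===== SOURCE A (Python) =====
-- def stillHaveMotion(rows, col):
--     res = False
--     n = len(rows)
--     hasSpace = False
--     for i in range(n):
--         if rows[n-1-i][col] == ".":
--             hasSpace = True
--         elif hasSpace:
--             res = True
--     return res
-- ===== SOURCE B (Python) =====
-- def stillHaveMotion(rows, col):
--     s = ''.join(row[col] for row in rows)
--     return '.' in s.lstrip('.')
-- ===== Notes on version B (the rewrite author's own statement) =====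
-- stated objective: idiomatic
-- what changed: Replaces A's bottom-up stateful scan (two boolean flags, elif branch) by building the column string top-to-bottom and testing '.' in s.lstrip('.').
import Mathlib
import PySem

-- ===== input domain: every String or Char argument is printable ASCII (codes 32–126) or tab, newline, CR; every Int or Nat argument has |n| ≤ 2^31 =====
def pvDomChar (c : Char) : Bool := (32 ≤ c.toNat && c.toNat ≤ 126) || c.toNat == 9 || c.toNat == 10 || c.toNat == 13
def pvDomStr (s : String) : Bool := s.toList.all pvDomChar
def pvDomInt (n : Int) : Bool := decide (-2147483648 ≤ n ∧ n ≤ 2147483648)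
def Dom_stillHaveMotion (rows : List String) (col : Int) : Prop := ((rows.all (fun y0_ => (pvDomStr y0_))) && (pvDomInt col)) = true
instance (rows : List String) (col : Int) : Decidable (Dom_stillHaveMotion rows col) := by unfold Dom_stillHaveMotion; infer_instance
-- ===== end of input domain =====

-- B builds the column character list top-to-bottom and tests '.' in s.lstrip('.') — idiomatic one-liner instead of A's bottom-up two-flag scan


-- ===== PORT A =====
-- for i in range(n) with state (res, hasSpace); rows[n-1-i][col] via pyGetD / Str.pyGet? (the IndexError case is excluded by Pre_, so the '?' default is never used there)
def stillHaveMotion (rows : List String) (col : Int) : Bool :=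
  let n : Int := PySem.List.len rows
  ((PySem.List.pyRange 0 n).foldl
    (fun (st : Bool × Bool) i =>
      if ((PySem.Str.pyGet? (PySem.List.pyGetD rows (n - 1 - i) "") col).getD '?') == '.' then
        (st.1, true)
      else if st.2 then (true, st.2) else st)
    (false, false)).1

-- ===== PORT B =====
-- ''.join(row[col] for row in rows) is exactly the list of column characters; s.lstrip('.') = dropWhile (== '.'); "'.' in s" = contains — exact step for step
def stillHaveMotion_alt (rows : List String) (col : Int) : Bool :=
  let s : List Char := rows.map (fun row => (PySem.Str.pyGet? row col).getD '?')
  (s.dropWhile (fun c => c == '.')).contains '.'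

-- ===== PRECONDITION & SPEC =====
-- Pre_ excludes exactly the inputs where the Python A raises IndexError: some row for which col is not a valid (possibly negative) index
def Pre_stillHaveMotion (rows : List String) (col : Int) : Prop :=
  ∀ r ∈ rows, PySem.Raise.InRange r.toList.length col
instance (rows : List String) (col : Int) : Decidable (Pre_stillHaveMotion rows col) := by
  unfold Pre_stillHaveMotion; infer_instance
def pvWitness_stillHaveMotion : List String × Int := (["#.", "..", "##"], 1)

def Spec_stillHaveMotion (rows : List String) (col : Int) (out : Bool) : Prop := out = stillHaveMotion_alt rows col
instance (rows : List String) (col : Int) (out : Bool) : Decidable (Spec_stillHaveMotion rows col out) := by unfold Spec_stillHaveMotion; infer_instance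

-- ===== CLAIM (what is proved, stated in full; the proofs are below) =====
def Claim_equal_stillHaveMotion : Prop := ∀ (rows : List String) (col : Int), Dom_stillHaveMotion rows col → Pre_stillHaveMotion rows col → Spec_stillHaveMotion rows col (stillHaveMotion rows col)

-- ===== LEMMAS AND PROOFS =====

-- A's loop body, on the already-extracted column character
def pvStepA (st : Bool × Bool) (c : Char) : Bool × Bool :=
  if c == '.' then (st.1, true) else if st.2 then (true, st.2) else st

-- folding A's step bottom-up over a column (= foldr top-down) computes B's test, with hasSpace = "any '.'"
lemma pvKey (cs : List Char) :
    cs.foldr (fun c st => pvStepA st c) (false, false)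
      = ((cs.dropWhile (fun c => c == '.')).contains '.', cs.any (fun c => c == '.')) := by
  induction cs with
  | nil => rfl
  | cons c rest ih =>
    rw [List.foldr_cons, ih]
    by_cases h : c = '.'
    · subst h
      simp [pvStepA]
    · have hc : (c == '.') = false := by simp [h]
      rw [List.dropWhile_cons, hc]
      by_cases hs : rest.any (fun c => c == '.') = true
      · have hm : ('.' : Char) ∈ rest := by
          rcases List.any_eq_true.mp hs with ⟨x, hx, hx'⟩
          rw [beq_iff_eq] at hx'; exact hx' ▸ hx
        simp [pvStepA, hs, hc, hm]
      · have hs' : rest.any (fun c => c == '.') = false := by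
          cases hval : rest.any (fun c => c == '.')
          · rfl
          · exact absurd hval hs
        have hnm : ('.' : Char) ∉ rest := by
          intro hmem
          exact hs (List.any_eq_true.mpr ⟨'.', hmem, by simp⟩)
        have hnd : ('.' : Char) ∉ rest.dropWhile (fun c => c == '.') := fun hmem =>
          hnm ((List.dropWhile_sublist _).mem hmem)
        have h2 : ¬('.' : Char) = c := fun he => h he.symm
        simp [pvStepA, hs', hc, hnm, hnd, h2]

-- ===== VERDICT (by name: the statement is the Claim_ definition above) =====
theorem stillHaveMotion_spec : Claim_equal_stillHaveMotion := by
  intro rows col _ _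
  unfold Spec_stillHaveMotion
  -- step 1: A's indexed loop over range(n) is the fold of the same body over rows.reverse
  have step1 :
      (PySem.List.pyRange 0 (PySem.List.len rows)).foldl
        (fun (st : Bool × Bool) i =>
          if ((PySem.Str.pyGet? (PySem.List.pyGetD rows (PySem.List.len rows - 1 - i) "") col).getD '?') == '.' then
            (st.1, true)
          else if st.2 then (true, st.2) else st)
        (false, false)
      = rows.reverse.foldl
        (fun (st : Bool × Bool) r =>
          if ((PySem.Str.pyGet? r col).getD '?') == '.' then (st.1, true)
          else if st.2 then (true, st.2) else st)
        (false, false) := by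
    rw [← PySem.List.foldl_pyRange_zero_pyGetD rows.reverse ""
          (fun (st : Bool × Bool) r =>
            if ((PySem.Str.pyGet? r col).getD '?') == '.' then (st.1, true)
            else if st.2 then (true, st.2) else st)
          (false, false)]
    have hlen' : PySem.List.len rows.reverse = PySem.List.len rows := by
      simp [PySem.List.len]
    rw [hlen']
    apply PySem.List.foldl_congr_mem
    intro acc i hi
    obtain ⟨h0i, h1i⟩ := PySem.List.mem_pyRange_one.mp hi
    have hlen : PySem.List.len rows = (rows.length : Int) := by simp [PySem.List.len]
    rw [hlen] at h1i
    have e1 : PySem.List.len rows - 1 - i = ((rows.length : Int) - 1 - i) := by rw [hlen]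
    have hrl : i < ((rows.reverse.length : Nat) : Int) := by simpa using h1i
    rw [e1, PySem.List.pyGetD_eq_getElem rows "" (by omega) (by omega),
        PySem.List.pyGetD_eq_getElem rows.reverse "" h0i hrl]
    rw [List.getElem_reverse]
    have hidx : ((rows.length : Int) - 1 - i).toNat = rows.length - 1 - i.toNat := by omega
    simp [hidx]
  -- step 2: pull the column extraction out of the fold
  have step2 :
      rows.reverse.foldl
        (fun (st : Bool × Bool) r =>
          if ((PySem.Str.pyGet? r col).getD '?') == '.' then (st.1, true)
          else if st.2 then (true, st.2) else st)
        (false, false)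
      = List.foldl pvStepA (false, false)
          ((rows.map (fun row => (PySem.Str.pyGet? row col).getD '?')).reverse) := by
    rw [← List.map_reverse, List.foldl_map]
    rfl
  show ((PySem.List.pyRange 0 (PySem.List.len rows)).foldl
    (fun (st : Bool × Bool) i =>
      if ((PySem.Str.pyGet? (PySem.List.pyGetD rows (PySem.List.len rows - 1 - i) "") col).getD '?') == '.' then
        (st.1, true)
      else if st.2 then (true, st.2) else st)
    (false, false)).1
    = (((rows.map (fun row => (PySem.Str.pyGet? row col).getD '?')).dropWhile (fun c => c == '.')).contains '.')
  rw [step1, step2, List.foldl_reverse]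
  have hkey := pvKey (rows.map (fun row => (PySem.Str.pyGet? row col).getD '?'))
  rw [hkey]
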